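-- pv_equiv track=rewrite | github.com/jchxu/Format_Data | v2/WriteFunc.py | ClassLineIndex
-- ===== SOURCE A (Python) =====
-- def ClassLineIndex(GoodsClassName, GoodsClassList):
--     ClassLineIndexDict = {}
--     ClassLineIndexDict[0] = 0
--     for i in range(1,len(GoodsClassName)):
--         ClassLineIndexDict[i] = len(GoodsClassList[i-1]) + ClassLineIndexDict[i-1] + 1
--         if i >= 3:  #假设只列出前两类的明细
--             ClassLineIndexDict[i] = ClassLineIndexDict[i-1] + 1
--     return ClassLineIndexDict
-- ===== SOURCE B (Python) =====
-- def ClassLineIndex(GoodsClassName, GoodsClassList):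
--     # Closed form: only the first two class sizes ever matter; every later class
--     # adds exactly one line.  out[i] = sum of (len+1) over the first min(i,2)
--     # classes, plus max(i-2, 0).  No running accumulator, each entry is computed
--     # directly from i.
--     heads = [len(x) + 1 for x in GoodsClassList[:2]]
--     n = max(len(GoodsClassName), 1)
--     return {i: sum(heads[:min(i, 2)]) + max(i - 2, 0) for i in range(n)}
-- ===== Notes on version B (the rewrite author's own statement) =====
-- stated objective: alternative
-- what changed: A's stateful loop (recurrence offset[i] = offset[i-1] + increment, with a conditional overwrite) is replaced by a direct closed-form formula per index: out[i] = sum of (len+1) over the first min(i,2) classes plus max(i-2,0), computed independently for each i with no running accumulator.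
import Mathlib
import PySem

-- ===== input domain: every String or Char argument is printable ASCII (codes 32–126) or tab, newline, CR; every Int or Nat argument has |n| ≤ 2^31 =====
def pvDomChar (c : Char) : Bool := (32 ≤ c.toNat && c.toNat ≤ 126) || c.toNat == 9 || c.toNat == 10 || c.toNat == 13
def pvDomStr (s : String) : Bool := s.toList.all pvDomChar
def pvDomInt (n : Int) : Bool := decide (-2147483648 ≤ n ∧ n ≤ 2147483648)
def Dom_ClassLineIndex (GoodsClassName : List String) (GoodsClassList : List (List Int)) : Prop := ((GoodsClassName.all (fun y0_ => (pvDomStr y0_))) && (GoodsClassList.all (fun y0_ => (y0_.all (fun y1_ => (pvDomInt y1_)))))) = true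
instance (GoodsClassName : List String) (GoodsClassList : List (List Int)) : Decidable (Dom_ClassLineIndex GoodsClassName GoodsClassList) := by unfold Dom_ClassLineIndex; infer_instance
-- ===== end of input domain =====

-- B replaces A's stateful recurrence loop by a direct closed-form formula per index
-- (only the first two class sizes matter; later classes add one line each); objective: alternative.

-- ===== PORT A =====
def ClassLineIndex (GoodsClassName : List String) (GoodsClassList : List (List Int)) : List (Int × Int) :=
  ((PySem.List.pyRange 1 (GoodsClassName.length : Int) 1).foldl
    (fun d i =>
      let d := d.insert i ((((PySem.List.pyGet? GoodsClassList (i - 1)).getD []).length : Int) + d.getD (i - 1) 0 + 1)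
      if 3 ≤ i then d.insert i (d.getD (i - 1) 0 + 1) else d)
    ((PySem.Dict.empty : PySem.Dict Int Int).insert 0 0)).items

-- ===== PORT B =====
-- Source B: heads = [len(x)+1 for x in L[:2]]  (slice with nonnegative literal bound = take, exact);
-- the dict comprehension over range(n) has distinct increasing keys, so its association list
-- in insertion order is exactly this map.
def ClassLineIndex_alt (GoodsClassName : List String) (GoodsClassList : List (List Int)) : List (Int × Int) :=
  let heads : List Int := (GoodsClassList.take 2).map (fun x => (x.length : Int) + 1)
  let n : Nat := max GoodsClassName.length 1
  (List.range n).map (fun (i : Nat) => ((i : Int), (heads.take (min i 2)).sum + max ((i : Int) - 2) 0))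

-- ===== PRECONDITION & SPEC =====
-- Pre_ excludes exactly the inputs on which A raises IndexError: the loop reads
-- GoodsClassList[i-1] for every i in 1..len(GoodsClassName)-1, so A raises iff
-- len(GoodsClassName) > len(GoodsClassList) + 1.
def Pre_ClassLineIndex (GoodsClassName : List String) (GoodsClassList : List (List Int)) : Prop :=
  GoodsClassName.length ≤ GoodsClassList.length + 1
instance (GoodsClassName : List String) (GoodsClassList : List (List Int)) : Decidable (Pre_ClassLineIndex GoodsClassName GoodsClassList) := by unfold Pre_ClassLineIndex; infer_instance
def pvWitness_ClassLineIndex : List String × List (List Int) := (["a", "b"], [[1, 2]])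

def Spec_ClassLineIndex (GoodsClassName : List String) (GoodsClassList : List (List Int)) (out : List (Int × Int)) : Prop := out = ClassLineIndex_alt GoodsClassName GoodsClassList
instance (GoodsClassName : List String) (GoodsClassList : List (List Int)) (out : List (Int × Int)) : Decidable (Spec_ClassLineIndex GoodsClassName GoodsClassList out) := by unfold Spec_ClassLineIndex; infer_instance

-- ===== CLAIM (what is proved, stated in full; the proofs are below) =====
def Claim_equal_ClassLineIndex : Prop := ∀ (GoodsClassName : List String) (GoodsClassList : List (List Int)), Dom_ClassLineIndex GoodsClassName GoodsClassList → Pre_ClassLineIndex GoodsClassName GoodsClassList → Spec_ClassLineIndex GoodsClassName GoodsClassList (ClassLineIndex GoodsClassName GoodsClassList)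

-- ===== LEMMAS AND PROOFS =====

-- the running offset after class k (characterises A's dict values)
def pvOff (L : List (List Int)) : Nat → Int
  | 0 => 0
  | k + 1 => pvOff L k + (if ((k : Int) + 1) < 3 then ((L.getD k []).length : Int) + 1 else 1)

-- B's closed form at index k
def pvClosed (L : List (List Int)) (k : Nat) : Int :=
  (((L.take 2).map (fun x => (x.length : Int) + 1)).take (min k 2)).sum + max ((k : Int) - 2) 0

-- the dict contents after keys 0..n-1 have been produced
def pvTgt (L : List (List Int)) (n : Nat) : List (Int × Int) :=
  (List.range n).map (fun (k : Nat) => ((k : Int), pvOff L k))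

theorem pvTgt_succ (L : List (List Int)) (n : Nat) :
    pvTgt L (n + 1) = pvTgt L n ++ [((n : Int), pvOff L n)] := by
  simp [pvTgt, List.range_succ]

theorem get?_mk_range' (L : List (List Int)) :
    ∀ (k s : Nat) (j : Int),
      (PySem.Dict.mk ((List.range' s k).map (fun (m : Nat) => ((m : Int), pvOff L m)))).get? j
        = if (s : Int) ≤ j ∧ j < (s : Int) + k then some (pvOff L j.toNat) else none := by
  intro k
  induction k with
  | zero => intro s j; simp [PySem.Dict.get?]
  | succ k ih =>
    intro s j
    rw [List.range'_succ]
    simp only [List.map_cons, PySem.Dict.get?_mk_cons]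
    by_cases h : (s : Int) = j
    · subst h; simp
    · rw [if_neg (by simpa using h)]
      rw [ih (s + 1) j]
      push_cast
      by_cases h1 : (s : Int) + 1 ≤ j ∧ j < (s : Int) + 1 + k
      · rw [if_pos h1, if_pos (by omega)]
      · rw [if_neg h1, if_neg (by omega)]

theorem get?_mk_pvTgt (L : List (List Int)) (n : Nat) (j : Int) :
    (PySem.Dict.mk (pvTgt L n)).get? j
      = if 0 ≤ j ∧ j < (n : Int) then some (pvOff L j.toNat) else none := by
  have := get?_mk_range' L n 0 j
  simpa [pvTgt, List.range_eq_range'] using this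

theorem get?_mk_append {ν : Type} (l1 l2 : List (Int × ν)) (k : Int) :
    (PySem.Dict.mk (l1 ++ l2)).get? k
      = ((PySem.Dict.mk l1).get? k).or ((PySem.Dict.mk l2).get? k) := by
  induction l1 with
  | nil => simp [PySem.Dict.get?]
  | cons p rest ih =>
    obtain ⟨a, b⟩ := p
    rw [List.cons_append, PySem.Dict.get?_mk_cons, PySem.Dict.get?_mk_cons]
    by_cases h : (a == k) = true
    · simp [h]
    · simp [h, ih]

theorem pvDict_eq_of_items_eq {d : PySem.Dict Int Int} {l : List (Int × Int)}
    (h : d.items = l) : d = PySem.Dict.mk l := by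
  cases d; cases h; rfl

theorem pvA_fold (GoodsClassList : List (List Int)) :
    ∀ n : Nat,
      ((PySem.List.pyRange 1 ((n + 1 : Nat) : Int) 1).foldl
        (fun d i =>
          let d := d.insert i ((((PySem.List.pyGet? GoodsClassList (i - 1)).getD []).length : Int) + d.getD (i - 1) 0 + 1)
          if 3 ≤ i then d.insert i (d.getD (i - 1) 0 + 1) else d)
        ((PySem.Dict.empty : PySem.Dict Int Int).insert 0 0))
      = PySem.Dict.mk (pvTgt GoodsClassList (n + 1)) := by
  intro n
  induction n with
  | zero =>
    rw [PySem.List.pyRange_one_eq_nil (by norm_num)]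
    show _ = _
    simp [pvTgt, pvOff, List.range_succ]
    rfl
  | succ n ih =>
    have hc : ((n + 1 + 1 : Nat) : Int) = ((n + 1 : Nat) : Int) + 1 := by push_cast; ring
    rw [hc, PySem.List.pyRange_one_succ_right (by omega), List.foldl_append, ih]
    simp only [List.foldl_cons, List.foldl_nil]
    have hk : ((n + 1 : Nat) : Int) - 1 = (n : Int) := by push_cast; ring
    have hget : (PySem.Dict.mk (pvTgt GoodsClassList (n + 1))).getD ((n : Nat) : Int) 0
        = pvOff GoodsClassList n := by
      rw [PySem.Dict.getD_eq_get?_getD, get?_mk_pvTgt, if_pos ⟨by omega, by omega⟩]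
      simp
    have hnc : (PySem.Dict.mk (pvTgt GoodsClassList (n + 1))).contains ((n + 1 : Nat) : Int) = false := by
      rw [PySem.Dict.contains_eq_isSome_get?, get?_mk_pvTgt, if_neg (by omega)]
      rfl
    simp only [hk, PySem.List.pyGet?_natCast, ← List.getD_eq_getElem?_getD, hget]
    set v : Int := ((GoodsClassList.getD n []).length : Int) + pvOff GoodsClassList n + 1 with hv
    have hins : (PySem.Dict.mk (pvTgt GoodsClassList (n + 1))).insert ((n + 1 : Nat) : Int) v
        = PySem.Dict.mk (pvTgt GoodsClassList (n + 1) ++ [(((n + 1 : Nat) : Int), v)]) :=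
      pvDict_eq_of_items_eq (by rw [PySem.Dict.items_insert_of_not_contains _ _ hnc])
    rw [hins]
    by_cases h3 : (3 : Int) ≤ ((n + 1 : Nat) : Int)
    · rw [if_pos h3]
      have hget2 : (PySem.Dict.mk (pvTgt GoodsClassList (n + 1) ++ [(((n + 1 : Nat) : Int), v)])).getD
          (((n : Nat) : Int)) 0 = pvOff GoodsClassList n := by
        rw [PySem.Dict.getD_eq_get?_getD, get?_mk_append, get?_mk_pvTgt, if_pos ⟨by omega, by omega⟩]
        simp
      have hc2 : (PySem.Dict.mk (pvTgt GoodsClassList (n + 1) ++ [(((n + 1 : Nat) : Int), v)])).contains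
          ((n + 1 : Nat) : Int) = true := by
        rw [PySem.Dict.contains_eq_isSome_get?, get?_mk_append, get?_mk_pvTgt, if_neg (by omega)]
        simp [PySem.Dict.get?_mk_cons]
      rw [hget2]
      refine pvDict_eq_of_items_eq ?_
      rw [PySem.Dict.items_insert_of_contains _ _ hc2]
      simp only [List.map_append]
      have hmap : (pvTgt GoodsClassList (n + 1)).map
          (fun p => if (p.1 == ((n + 1 : Nat) : Int)) = true then (((n + 1 : Nat) : Int), pvOff GoodsClassList n + 1) else p)
          = pvTgt GoodsClassList (n + 1) := by
        refine (List.map_congr_left ?_).trans (List.map_id _)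
        intro p hp
        simp only [pvTgt, List.mem_map, List.mem_range] at hp
        obtain ⟨m, hm, rfl⟩ := hp
        simp only [beq_iff_eq, Int.natCast_add, Int.natCast_one, id_eq]
        rw [if_neg (by omega)]
      rw [hmap, pvTgt_succ GoodsClassList (n + 1)]
      simp only [List.map_cons, List.map_nil, List.append_cancel_left_eq]
      have : pvOff GoodsClassList (n + 1) = pvOff GoodsClassList n + 1 := by
        rw [pvOff, if_neg (by omega)]
      simp [this]
    · rw [if_neg h3, pvTgt_succ GoodsClassList (n + 1)]
      have : pvOff GoodsClassList (n + 1)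
          = pvOff GoodsClassList n + (((GoodsClassList.getD n []).length : Int) + 1) := by
        rw [pvOff, if_pos (by omega)]
      congr 1
      simp only [List.append_cancel_left_eq]
      rw [this, hv]
      congr 1
      push_cast
      ring_nf

-- the recurrence offset equals B's closed form whenever the indices A actually reads exist
theorem pvOff_eq_closed (L : List (List Int)) :
    ∀ k : Nat, (1 ≤ k → min k 2 ≤ L.length) → pvOff L k = pvClosed L k := by
  intro k
  induction k with
  | zero => intro _; simp [pvOff, pvClosed]
  | succ k ih =>
    intro hlen
    match k with
    | 0 =>
      have h1 : 1 ≤ L.length := by simpa using hlen (by omega)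
      obtain ⟨a, t, rfl⟩ : ∃ a t, L = a :: t := by
        cases L with
        | nil => simp at h1
        | cons a t => exact ⟨a, t, rfl⟩
      simp [pvOff, pvClosed]
    | 1 =>
      have h2 : 2 ≤ L.length := by simpa using hlen (by omega)
      obtain ⟨a, b, t, rfl⟩ : ∃ a b t, L = a :: b :: t := by
        cases L with
        | nil => simp at h2
        | cons a t =>
          cases t with
          | nil => simp at h2
          | cons b t => exact ⟨a, b, t, rfl⟩
      simp [pvOff, pvClosed]
    | m + 2 =>
      have hmin : min (m + 2) 2 = 2 := by omega
      have hlen' : 1 ≤ m + 2 → min (m + 2) 2 ≤ L.length := by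
        intro _; have := hlen (by omega); omega
      have hstep : pvOff L (m + 3) = pvOff L (m + 2) + 1 := by
        rw [pvOff, if_neg (by push_cast; omega)]
      rw [hstep, ih hlen']
      unfold pvClosed
      rw [hmin, show min (m + 3) 2 = 2 from by omega]
      push_cast
      omega

-- ===== VERDICT (by name: the statement is the Claim_ definition above) =====
theorem ClassLineIndex_spec : Claim_equal_ClassLineIndex := by
  intro names lists _ hpre
  unfold Spec_ClassLineIndex ClassLineIndex ClassLineIndex_alt
  unfold Pre_ClassLineIndex at hpre
  cases hn : names.length with
  | zero =>
    rw [PySem.List.pyRange_one_eq_nil (by norm_num)]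
    simp
    rfl
  | succ n =>
    rw [pvA_fold lists n]
    rw [hn] at hpre
    show pvTgt lists (n + 1) = (List.range (max (n + 1) 1)).map
      (fun (i : Nat) => ((i : Int),
        (((lists.take 2).map (fun x => (x.length : Int) + 1)).take (min i 2)).sum + max ((i : Int) - 2) 0))
    rw [show max (n + 1) 1 = n + 1 from by omega]
    unfold pvTgt
    refine List.map_congr_left ?_
    intro i hi
    simp only [List.mem_range] at hi
    have := pvOff_eq_closed lists i (by intro h1; omega)
    rw [this]
    rfl
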